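-- pv_equiv track=rewrite | github.com/MagTer/ai-agent-platform | rich/console.py | _apply_colors
-- ===== SOURCE A (Python) =====
-- ANSI_MAP = {
--     "reset": "\x1b[0m",
--     "cyan": "\x1b[36m",
--     "yellow": "\x1b[33m",
--     "green": "\x1b[32m",
--     "red": "\x1b[31m",
-- }
--
-- def _apply_colors(payload: str) -> str:
--     result: list[str] = []
--     i = 0
--     open_color = False
--     while i < len(payload):
--         if payload[i] == "[":
--             closing = payload.find("]", i + 1)
--             if closing != -1:
--                 tag = payload[i + 1 : closing]
--                 if tag.startswith("/"):
--                     color_name = tag[1:]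
--                     if color_name in ANSI_MAP:
--                         result.append(ANSI_MAP["reset"])
--                         open_color = False
--                         i = closing + 1
--                         continue
--                 elif tag in ANSI_MAP:
--                     result.append(ANSI_MAP[tag])
--                     open_color = True
--                     i = closing + 1
--                     continue
--         result.append(payload[i])
--         i += 1
--
--     if open_color:
--         result.append(ANSI_MAP["reset"])
--     return "".join(result)
-- ===== SOURCE B (Python) =====
-- _TOKENS = {
--     "[reset]": ("\x1b[0m", True),
--     "[/reset]": ("\x1b[0m", False),
--     "[cyan]": ("\x1b[36m", True),
--     "[/cyan]": ("\x1b[0m", False),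
--     "[yellow]": ("\x1b[33m", True),
--     "[/yellow]": ("\x1b[0m", False),
--     "[green]": ("\x1b[32m", True),
--     "[/green]": ("\x1b[0m", False),
--     "[red]": ("\x1b[31m", True),
--     "[/red]": ("\x1b[0m", False),
-- }
--
-- def _apply_colors(payload: str) -> str:
--     out: list[str] = []
--     open_color = False
--     i = 0
--     n = len(payload)
--     while i < n:
--         j = payload.find("[", i)
--         if j == -1:
--             out.append(payload[i:])
--             break
--         out.append(payload[i:j])
--         for tok, (code, flag) in _TOKENS.items():
--             if payload.startswith(tok, j):
--                 out.append(code)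
--                 open_color = flag
--                 i = j + len(tok)
--                 break
--         else:
--             out.append("[")
--             i = j + 1
--     if open_color:
--         out.append("\x1b[0m")
--     return "".join(out)
-- ===== Notes on version B (the rewrite author's own statement) =====
-- stated objective: faster
-- what changed: A scans character by character and, at every opening bracket, searches the whole remaining string for the next closing bracket, slices out the tag and looks it up in ANSI_MAP; B precomputes the ten complete bracketed tag tokens once and makes a single pass that block-copies the text up to each opening bracket and tries the tokens as prefixes there, never searching for a closing bracket.
import Mathlib
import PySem

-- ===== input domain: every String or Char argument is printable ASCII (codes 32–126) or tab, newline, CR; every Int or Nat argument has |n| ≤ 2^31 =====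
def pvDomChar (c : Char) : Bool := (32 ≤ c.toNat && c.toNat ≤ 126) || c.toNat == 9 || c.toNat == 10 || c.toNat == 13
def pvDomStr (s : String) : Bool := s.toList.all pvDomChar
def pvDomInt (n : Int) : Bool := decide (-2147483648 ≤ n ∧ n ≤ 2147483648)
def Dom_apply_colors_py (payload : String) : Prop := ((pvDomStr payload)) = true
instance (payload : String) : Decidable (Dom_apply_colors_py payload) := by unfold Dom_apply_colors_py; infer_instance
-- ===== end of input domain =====

-- B replaces A's per-character scan (which searches the whole remaining string for a closing bracket
-- at every opening bracket) by a single pass that block-copies up to the next opening bracket and tries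
-- the ten precomputed complete tag tokens as prefixes there; objective: faster (measured).

-- ===== PORT A =====
-- ANSI_MAP, keys and values as char lists
def pvAnsiMapA : List (List Char × List Char) :=
  [ ("reset".toList, "\x1b[0m".toList), ("cyan".toList, "\x1b[36m".toList),
    ("yellow".toList, "\x1b[33m".toList), ("green".toList, "\x1b[32m".toList),
    ("red".toList, "\x1b[31m".toList) ]

-- the while loop of A: at '[' search for the next ']' (payload.find), slice the tag, look it up
def pvLoopA : List Char → Bool → List Char
  | [], oc => if oc then "\x1b[0m".toList else []
  | c :: rest, oc =>
    if c = '[' then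
      match rest.findIdx? (· == ']') with
      | some k =>
        match rest.take k with
        | '/' :: name =>
          if (pvAnsiMapA.lookup name).isSome then
            "\x1b[0m".toList ++ pvLoopA (rest.drop (k + 1)) false
          else c :: pvLoopA rest oc
        | tag =>
          match pvAnsiMapA.lookup tag with
          | some code => code ++ pvLoopA (rest.drop (k + 1)) true
          | none => c :: pvLoopA rest oc
      | none => c :: pvLoopA rest oc
    else c :: pvLoopA rest oc
termination_by l _ => l.length
decreasing_by all_goals (simp; try omega)

def apply_colors_py (payload : String) : String :=
  String.ofList (pvLoopA payload.toList false)

-- ===== PORT B =====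
-- B's literal token table _TOKENS: full bracketed token ↦ (code, open_color flag)
def pvTokensB : List (List Char × List Char × Bool) :=
  [ ("[reset]".toList, "\x1b[0m".toList, true), ("[/reset]".toList, "\x1b[0m".toList, false),
    ("[cyan]".toList, "\x1b[36m".toList, true), ("[/cyan]".toList, "\x1b[0m".toList, false),
    ("[yellow]".toList, "\x1b[33m".toList, true), ("[/yellow]".toList, "\x1b[0m".toList, false),
    ("[green]".toList, "\x1b[32m".toList, true), ("[/green]".toList, "\x1b[0m".toList, false),
    ("[red]".toList, "\x1b[31m".toList, true), ("[/red]".toList, "\x1b[0m".toList, false) ]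

-- the while loop of B: block-copy up to the next '[' (payload.find), there try each full token
-- of the table as a prefix (startswith), else copy the single '[' and go on
def pvLoopB (l : List Char) (oc : Bool) : List Char :=
  match _hfb : l.findIdx? (· == '[') with
  | none => l ++ (if oc then "\x1b[0m".toList else [])
  | some j =>
    l.take j ++
      (match pvTokensB.find? (fun t => t.1.isPrefixOf (l.drop j)) with
       | some t => t.2.1 ++ pvLoopB (List.drop (t.1.length - 1) ((l.drop j).drop 1)) t.2.2
       | none => '[' :: pvLoopB ((l.drop j).drop 1) oc)
termination_by l.length
decreasing_by
  all_goals
    obtain ⟨hj, -, -⟩ := List.findIdx?_eq_some_iff_getElem.mp _hfb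
    simp
    omega

def apply_colors_py_alt (payload : String) : String :=
  String.ofList (pvLoopB payload.toList false)

-- ===== PRECONDITION & SPEC =====
def Spec_apply_colors_py (payload : String) (out : String) : Prop := out = apply_colors_py_alt payload
instance (payload : String) (out : String) : Decidable (Spec_apply_colors_py payload out) := by unfold Spec_apply_colors_py; infer_instance

-- ===== CLAIM (what is proved, stated in full; the proofs are below) =====
def Claim_equal_apply_colors_py : Prop := ∀ (payload : String), Dom_apply_colors_py payload → Spec_apply_colors_py payload (apply_colors_py payload)

-- ===== LEMMAS AND PROOFS =====

-- if two ']'-free bodies are closed by ']' and one bracketed form is a prefix of the other, the bodies agree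
lemma pv_prefix_unique : ∀ (a b s : List Char), ']' ∉ a → ']' ∉ b →
    (a ++ [']']).isPrefixOf (b ++ ']' :: s) = true → a = b := by
  intro a
  induction a with
  | nil =>
    intro b s _ hb hpre
    cases b with
    | nil => rfl
    | cons y b' =>
      simp [List.isPrefixOf] at hpre
      simp [← hpre] at hb
  | cons x a' iha =>
    intro b s ha hb hpre
    cases b with
    | nil =>
      simp [List.isPrefixOf] at hpre
      simp [hpre.1] at ha
    | cons y b' =>
      simp [List.isPrefixOf] at hpre
      simp at ha hb
      rw [hpre.1, iha b' s ha.2 hb.2 (by simpa using hpre.2)]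

lemma pv_lookup_some_iff (name code : List Char) :
    pvAnsiMapA.lookup name = some code ↔
      (name = "reset".toList ∧ code = "\x1b[0m".toList) ∨
      (name = "cyan".toList ∧ code = "\x1b[36m".toList) ∨
      (name = "yellow".toList ∧ code = "\x1b[33m".toList) ∨
      (name = "green".toList ∧ code = "\x1b[32m".toList) ∨
      (name = "red".toList ∧ code = "\x1b[31m".toList) := by
  simp only [pvAnsiMapA, List.lookup]
  repeat' split
  all_goals simp_all
  all_goals exact eq_comm

lemma pvLoopB_none (l : List Char) (oc : Bool) (h : l.findIdx? (· == '[') = none) :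
    pvLoopB l oc = l ++ (if oc then "\x1b[0m".toList else []) := by
  rw [pvLoopB.eq_def]
  split
  · rfl
  · rename_i j heq
    rw [h] at heq
    cases heq

lemma pvLoopB_some (l : List Char) (oc : Bool) (j : Nat) (h : l.findIdx? (· == '[') = some j) :
    pvLoopB l oc = l.take j ++
      (match pvTokensB.find? (fun t => t.1.isPrefixOf (l.drop j)) with
       | some t => t.2.1 ++ pvLoopB (List.drop (t.1.length - 1) ((l.drop j).drop 1)) t.2.2
       | none => '[' :: pvLoopB ((l.drop j).drop 1) oc) := by
  rw [pvLoopB.eq_def]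
  split
  · rename_i heq
    rw [h] at heq
    cases heq
  · rename_i j' heq
    rw [h] at heq
    cases heq
    rfl

lemma pvLoopA_copy : ∀ (pre rest : List Char) (oc : Bool),
    (∀ x ∈ pre, (x == '[') = false) → pvLoopA (pre ++ rest) oc = pre ++ pvLoopA rest oc := by
  intro pre
  induction pre with
  | nil => intro rest oc _; simp
  | cons c pre' ihp =>
    intro rest oc hfree
    have hc : ¬c = '[' := by
      have := hfree c (by simp)
      simpa using this
    simp only [List.cons_append, pvLoopA, if_neg hc]
    rw [ihp rest oc (fun x hx => hfree x (by simp [hx]))]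

lemma pv_loop_eq : ∀ (n : Nat) (l : List Char), l.length ≤ n → ∀ oc, pvLoopA l oc = pvLoopB l oc := by
  intro n
  induction n with
  | zero =>
    intro l h oc
    have hl : l = [] := List.eq_nil_of_length_eq_zero (Nat.le_zero.mp h)
    subst hl; simp [pvLoopA, pvLoopB]
  | succ n ih =>
    intro l h oc
    cases hfb : l.findIdx? (· == '[') with
    | none =>
      have hnb := List.findIdx?_eq_none_iff.mp hfb
      have hcopy := pvLoopA_copy l [] oc hnb
      simp only [List.append_nil] at hcopy
      rw [hcopy, pvLoopB_none l oc hfb]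
      simp [pvLoopA]
    | some j =>
      obtain ⟨hj, hpj, hminj⟩ := List.findIdx?_eq_some_iff_getElem.mp hfb
      have hjc : l[j] = '[' := by simpa using hpj
      have hprefree : ∀ x ∈ l.take j, (x == '[') = false := by
        intro x hx
        obtain ⟨i, hi, hxi⟩ := List.mem_iff_getElem.mp hx
        have hik : i < j := lt_of_lt_of_le hi (List.length_take_le j l)
        have hm := hminj i hik
        rw [List.getElem_take] at hxi
        simp [← hxi] at hm ⊢
        exact hm
      have hdropj : l.drop j = '[' :: l.drop (j + 1) := by
        rw [List.drop_eq_getElem_cons hj, hjc]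
      have hcopy : pvLoopA l oc = l.take j ++ pvLoopA (l.drop j) oc := by
        conv_lhs => rw [← List.take_append_drop j l]
        exact pvLoopA_copy _ _ oc hprefree
      rw [hcopy, pvLoopB_some l oc j hfb]
      congr 1
      rw [hdropj]
      have hlen : (l.drop (j + 1)).length ≤ n := by
        simp only [List.length_drop]
        omega
      generalize l.drop (j + 1) = rest at hlen
      have hr := hlen
      cases hfi : rest.findIdx? (· == ']') with
        | none =>
          have hnomem : ∀ x ∈ rest, (x == ']') = false := List.findIdx?_eq_none_iff.mp hfi
          have hB : List.find? (fun t => t.1.isPrefixOf ('[' :: rest)) pvTokensB = none := by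
            rw [List.find?_eq_none]
            intro t ht
            simp only [pvTokensB, List.mem_cons, List.not_mem_nil, or_false] at ht
            rcases ht with rfl|rfl|rfl|rfl|rfl|rfl|rfl|rfl|rfl|rfl
            all_goals
              (intro hpre
               rw [List.isPrefixOf_iff_prefix] at hpre
               obtain ⟨s, hs⟩ := hpre
               have hmem : (']' : Char) ∈ '[' :: rest := by rw [← hs]; simp
               have hmem' : (']' : Char) ∈ rest := by simpa using hmem
               simpa using hnomem _ hmem')
          simp only [pvLoopA, hfi, hB, List.drop_succ_cons, List.drop_zero]
          exact congrArg _ (ih rest hr oc)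
        | some k =>
          obtain ⟨hk, hpk, hmin⟩ := List.findIdx?_eq_some_iff_getElem.mp hfi
          have hkc : rest[k] = ']' := by simpa using hpk
          have hsplit : rest = rest.take k ++ ']' :: rest.drop (k+1) := by
            conv_lhs => rw [← List.take_append_drop k rest]
            rw [List.drop_eq_getElem_cons hk, hkc]
          have hfree : (']' : Char) ∉ rest.take k := by
            intro hx
            obtain ⟨i, hi, hxi⟩ := List.mem_iff_getElem.mp hx
            have hik : i < k := lt_of_lt_of_le hi (List.length_take_le k rest)
            have hm := hmin i hik
            rw [List.getElem_take] at hxi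
            simp [hxi] at hm
          obtain ⟨r', hr'⟩ : ∃ r', List.drop (k + 1) rest = r' := ⟨_, rfl⟩
          have hdl : r'.length ≤ n := le_trans (by rw [← hr']; simp) hr
          rw [hr'] at hsplit
          simp only [pvLoopA, hfi, reduceIte]
          rw [hr']
          cases htag : rest.take k with
          | nil =>
            rw [htag] at hsplit
            simp only [List.nil_append] at hsplit
            have hB : List.find? (fun t => t.1.isPrefixOf ('[' :: rest)) pvTokensB = none := by
              rw [hsplit]
              simp [pvTokensB, List.find?, List.isPrefixOf]
            rw [hB]
            simp only [List.drop_succ_cons, List.drop_zero]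
            show (match List.lookup ([] : List Char) pvAnsiMapA with
                  | some code => code ++ pvLoopA r' true
                  | none => '[' :: pvLoopA rest oc) = _
            rw [show List.lookup ([] : List Char) pvAnsiMapA = none by decide]
            exact congrArg _ (ih rest hr oc)
          | cons x name =>
            rw [htag] at hsplit hfree
            simp only [List.cons_append, List.mem_cons, not_or] at hsplit hfree
            by_cases hx : x = '/'
            · subst hx
              cases hlk : List.lookup name pvAnsiMapA with
              | some code =>
                have hsome : (List.lookup name pvAnsiMapA).isSome = true := by rw [hlk]; rfl
                show (if (List.lookup name pvAnsiMapA).isSome = true then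
                        "\x1b[0m".toList ++ pvLoopA r' false
                      else '[' :: pvLoopA rest oc) = _
                rw [if_pos hsome]
                rcases (pv_lookup_some_iff name code).mp hlk with ⟨rfl,-⟩|⟨rfl,-⟩|⟨rfl,-⟩|⟨rfl,-⟩|⟨rfl,-⟩ <;>
                · rw [hsplit]
                  simp [pvTokensB, List.find?, List.isPrefixOf, ih r' hdl]
              | none =>
                have hnone : (List.lookup name pvAnsiMapA).isSome = false := by rw [hlk]; rfl
                show (if (List.lookup name pvAnsiMapA).isSome = true then
                        "\x1b[0m".toList ++ pvLoopA r' false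
                      else '[' :: pvLoopA rest oc) = _
                rw [hnone]
                simp only [Bool.false_eq_true, if_false]
                have hB : List.find? (fun t => t.1.isPrefixOf ('[' :: rest)) pvTokensB = none := by
                  rw [List.find?_eq_none]
                  intro t ht
                  simp only [pvTokensB, List.mem_cons, List.not_mem_nil, or_false] at ht
                  rw [hsplit]
                  rcases ht with rfl|rfl|rfl|rfl|rfl|rfl|rfl|rfl|rfl|rfl
                  · intro hpre; simp [List.isPrefixOf] at hpre
                  · intro hpre
                    have := pv_prefix_unique ['r','e','s','e','t'] name r' (by decide) hfree.2 (by simpa [List.isPrefixOf] using hpre)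
                    rw [← this] at hlk; revert hlk; decide
                  · intro hpre; simp [List.isPrefixOf] at hpre
                  · intro hpre
                    have := pv_prefix_unique ['c','y','a','n'] name r' (by decide) hfree.2 (by simpa [List.isPrefixOf] using hpre)
                    rw [← this] at hlk; revert hlk; decide
                  · intro hpre; simp [List.isPrefixOf] at hpre
                  · intro hpre
                    have := pv_prefix_unique ['y','e','l','l','o','w'] name r' (by decide) hfree.2 (by simpa [List.isPrefixOf] using hpre)
                    rw [← this] at hlk; revert hlk; decide
                  · intro hpre; simp [List.isPrefixOf] at hpre
                  · intro hpre
                    have := pv_prefix_unique ['g','r','e','e','n'] name r' (by decide) hfree.2 (by simpa [List.isPrefixOf] using hpre)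
                    rw [← this] at hlk; revert hlk; decide
                  · intro hpre; simp [List.isPrefixOf] at hpre
                  · intro hpre
                    have := pv_prefix_unique ['r','e','d'] name r' (by decide) hfree.2 (by simpa [List.isPrefixOf] using hpre)
                    rw [← this] at hlk; revert hlk; decide
                rw [hB]
                simp only [List.drop_succ_cons, List.drop_zero]
                exact congrArg _ (ih rest hr oc)
            · -- x ≠ '/', catchall branch of A's tag match
              have hnotb : (']' : Char) ∉ x :: name := by
                simp only [List.mem_cons, not_or]; exact ⟨hfree.1, hfree.2⟩
              split
              · rename_i name' heq
                exact absurd heq (by simp [hx])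
              · cases hlk : List.lookup (x :: name) pvAnsiMapA with
                | some code =>
                  have hsplit2 : rest = (x :: name) ++ ']' :: r' := by rw [hsplit]; rfl
                  rcases (pv_lookup_some_iff _ code).mp hlk with ⟨heq2,rfl⟩|⟨heq2,rfl⟩|⟨heq2,rfl⟩|⟨heq2,rfl⟩|⟨heq2,rfl⟩ <;>
                  · rw [heq2] at hsplit2
                    rw [hsplit2]
                    simp [pvTokensB, List.find?, List.isPrefixOf, ih r' hdl]
                | none =>
                  have hB : List.find? (fun t => t.1.isPrefixOf ('[' :: rest)) pvTokensB = none := by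
                    rw [List.find?_eq_none]
                    intro t ht
                    simp only [pvTokensB, List.mem_cons, List.not_mem_nil, or_false] at ht
                    rw [hsplit]
                    rcases ht with rfl|rfl|rfl|rfl|rfl|rfl|rfl|rfl|rfl|rfl
                    · intro hpre
                      have := pv_prefix_unique ['r','e','s','e','t'] (x :: name) r' (by decide) hnotb (by simpa [List.isPrefixOf] using hpre)
                      rw [← this] at hlk; revert hlk; decide
                    · intro hpre; simp [List.isPrefixOf, Ne.symm hx] at hpre
                    · intro hpre
                      have := pv_prefix_unique ['c','y','a','n'] (x :: name) r' (by decide) hnotb (by simpa [List.isPrefixOf] using hpre)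
                      rw [← this] at hlk; revert hlk; decide
                    · intro hpre; simp [List.isPrefixOf, Ne.symm hx] at hpre
                    · intro hpre
                      have := pv_prefix_unique ['y','e','l','l','o','w'] (x :: name) r' (by decide) hnotb (by simpa [List.isPrefixOf] using hpre)
                      rw [← this] at hlk; revert hlk; decide
                    · intro hpre; simp [List.isPrefixOf, Ne.symm hx] at hpre
                    · intro hpre
                      have := pv_prefix_unique ['g','r','e','e','n'] (x :: name) r' (by decide) hnotb (by simpa [List.isPrefixOf] using hpre)
                      rw [← this] at hlk; revert hlk; decide
                    · intro hpre; simp [List.isPrefixOf, Ne.symm hx] at hpre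
                    · intro hpre
                      have := pv_prefix_unique ['r','e','d'] (x :: name) r' (by decide) hnotb (by simpa [List.isPrefixOf] using hpre)
                      rw [← this] at hlk; revert hlk; decide
                    · intro hpre; simp [List.isPrefixOf, Ne.symm hx] at hpre
                  rw [hB]
                  simp only [List.drop_succ_cons, List.drop_zero]
                  exact congrArg _ (ih rest hr oc)

theorem pv_main (payload : String) : apply_colors_py payload = apply_colors_py_alt payload := by
  unfold apply_colors_py apply_colors_py_alt
  rw [pv_loop_eq payload.toList.length payload.toList le_rfl false]

-- ===== VERDICT (by name: the statement is the Claim_ definition above) =====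
theorem apply_colors_py_spec : Claim_equal_apply_colors_py := by
  intro payload _
  unfold Spec_apply_colors_py
  exact pv_main payload
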